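-- pv_equiv track=rewrite | github.com/ZXY0806/python_data_structures_and_algorithms | LeetCode600_in_python/leetcode600.py | solve
-- ===== SOURCE A (Python) =====
-- def solve(int_list, target):
--     diff = None
--     int_list.sort()
--     for index, num in enumerate(int_list):
--         if index > len(int_list) - 3:
--             break
--         target_value = target - num
--         left = index + 1
--         right = len(int_list) - 1
--         while left < right:
--             sub_value = int_list[left]+int_list[right]-target_value
--             sub_abs = abs(sub_value)
--             if sub_value == 0:
--                 diff = sub_abs
--                 return diff
--             if diff is None:
--                 diff = sub_abs
--             if sub_abs < diff:
--                 diff = sub_abs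
--             if sub_value > 0:
--                 right -= 1
--             if sub_value < 0:
--                 left += 1
--     return diff
-- ===== SOURCE B (Python) =====
-- def solve(int_list, target):
--     int_list.sort()  # kept for A's in-place-sort side effect on the argument
--     n = len(int_list)
--     best = None
--     for i in range(n):
--         for j in range(i + 1, n):
--             for k in range(j + 1, n):
--                 d = abs(int_list[i] + int_list[j] + int_list[k] - target)
--                 if best is None or d < best:
--                     best = d
--     return best
-- ===== Notes on version B (the rewrite author's own statement) =====
-- stated objective: simpler
-- what changed: Replaced the sort-then-two-pointer sweep with a direct exhaustive enumeration of all triples i<j<k keeping the running minimum of abs(sum-target); the in-place sort is kept only for A's argument mutation.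
import Mathlib
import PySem

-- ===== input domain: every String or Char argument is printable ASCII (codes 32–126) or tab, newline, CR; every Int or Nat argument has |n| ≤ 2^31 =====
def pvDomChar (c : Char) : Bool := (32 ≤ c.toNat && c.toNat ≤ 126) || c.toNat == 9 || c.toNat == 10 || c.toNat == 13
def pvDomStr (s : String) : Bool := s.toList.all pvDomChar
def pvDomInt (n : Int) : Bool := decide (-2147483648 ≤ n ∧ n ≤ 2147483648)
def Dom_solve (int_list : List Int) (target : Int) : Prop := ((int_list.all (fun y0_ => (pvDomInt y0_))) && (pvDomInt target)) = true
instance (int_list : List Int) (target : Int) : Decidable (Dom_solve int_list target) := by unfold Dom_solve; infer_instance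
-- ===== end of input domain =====

-- B replaces A's two-pointer sweep by a plain exhaustive minimum over all triples i<j<k (simpler, not faster);
-- both programs sort int_list in place (a side effect on the argument); the equivalence proved is about the RETURN value.

-- ===== PORT A =====
-- indices are kept as Nats; every xs.getD _ 0 below is an in-range Python indexing (1 ≤ left < right ≤ len-1, index ≤ len-3)
def tpLoop (xs : List Int) (tv : Int) (left right : Nat) (diff : Option Int) : Sum Int (Option Int) :=
  if _h : left < right then
    let s := xs.getD left 0 + xs.getD right 0 - tv
    let sa := |s|
    if hs0 : s = 0 then Sum.inl sa
    else
      let diff1 := if diff = none then some sa else diff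
      let diff2 := match diff1 with
        | none => diff1
        | some d => if sa < d then some sa else diff1
      tpLoop xs tv (if s < 0 then left + 1 else left) (if s > 0 then right - 1 else right) diff2
  else Sum.inr diff
termination_by right - left
decreasing_by split_ifs <;> omega

def outerLoop (xs : List Int) (target : Int) (index : Nat) (diff : Option Int) : Option Int :=
  if _h : index + 3 ≤ xs.length then
    match tpLoop xs (target - xs.getD index 0) (index + 1) (xs.length - 1) diff with
    | Sum.inl d => some d
    | Sum.inr diff' => outerLoop xs target (index + 1) diff'
  else diff
termination_by xs.length - index

def solve (int_list : List Int) (target : Int) : Option Int :=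
  outerLoop (PySem.List.sorted int_list (fun x => x) false) target 0 none

-- ===== PORT B =====
def solve_alt (int_list : List Int) (target : Int) : Option Int :=
  let xs := PySem.List.sorted int_list (fun x => x) false
  let n := xs.length
  (List.range n).foldl (fun best i =>
    (List.range' (i + 1) (n - (i + 1))).foldl (fun best j =>
      (List.range' (j + 1) (n - (j + 1))).foldl (fun best k =>
        let d := |xs.getD i 0 + xs.getD j 0 + xs.getD k 0 - target|
        match best with
        | none => some d
        | some b => if d < b then some d else best) best) best) none

-- ===== PRECONDITION & SPEC =====
def Spec_solve (int_list : List Int) (target : Int) (out : Option Int) : Prop := out = solve_alt int_list target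
instance (int_list : List Int) (target : Int) (out : Option Int) : Decidable (Spec_solve int_list target out) := by unfold Spec_solve; infer_instance

-- ===== CLAIM (what is proved, stated in full; the proofs are below) =====
def Claim_equal_solve : Prop := ∀ (int_list : List Int) (target : Int), Dom_solve int_list target → Spec_solve int_list target (solve int_list target)

-- ===== LEMMAS AND PROOFS =====

/-- option-valued running minimum (`None` = not seen yet). -/
def omin (b : Option Int) (a : Int) : Option Int :=
  match b with
  | none => some a
  | some x => some (min x a)

/-- the accumulator only ever holds nonnegative values. -/
def NonnegO (b : Option Int) : Prop := ∀ a, b = some a → 0 ≤ a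

/-- |xs[j] + xs[k] - tv| — one candidate value. -/
def colv (xs : List Int) (tv : Int) (j k : Nat) : Int := |xs.getD j 0 + xs.getD k 0 - tv|

/-- all candidate values for pairs l ≤ j < k ≤ r. -/
def pairs (xs : List Int) (tv : Int) (l r : Nat) : List Int :=
  (List.range' l (r - l)).flatMap (fun j => (List.range' (j + 1) (r - j)).map (colv xs tv j))

/-- all candidate values for triples with first index ≥ i. -/
def cands (xs : List Int) (t : Int) (i : Nat) : List Int :=
  (List.range' i (xs.length - i)).flatMap
    (fun ii => pairs xs (t - xs.getD ii 0) (ii + 1) (xs.length - 1))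

theorem omin_rcomm (b : Option Int) (a1 a2 : Int) : omin (omin b a1) a2 = omin (omin b a2) a1 := by
  cases b <;> simp [omin, min_assoc, min_comm a1 a2]

theorem foldl_omin_perm {L1 L2 : List Int} (p : L1.Perm L2) (acc : Option Int) :
    L1.foldl omin acc = L2.foldl omin acc :=
  @List.Perm.foldl_eq _ _ omin _ _ ⟨omin_rcomm⟩ p acc

theorem foldl_omin_absorb {L : List Int} {a : Int} (h : ∀ x ∈ L, a ≤ x) :
    L.foldl omin (some a) = some a := by
  induction L with
  | nil => rfl
  | cons x L ih =>
      have hx : a ≤ x := h x (by simp)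
      have : omin (some a) x = some a := by simp [omin, min_eq_left hx]
      simpa [List.foldl, this] using ih (fun y hy => h y (by simp [hy]))

theorem foldl_omin_nonneg {L : List Int} {acc : Option Int} (hacc : NonnegO acc)
    (hL : ∀ x ∈ L, 0 ≤ x) : NonnegO (L.foldl omin acc) := by
  induction L generalizing acc with
  | nil => exact hacc
  | cons x L ih =>
      refine ih ?_ (fun y hy => hL y (by simp [hy]))
      intro a ha
      have hx : 0 ≤ x := hL x (by simp)
      cases acc with
      | none => simp [omin] at ha; omega
      | some b =>
          have hb := hacc b rfl
          simp [omin] at ha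
          subst ha
          exact le_min hb hx

theorem foldl_omin_zero {L : List Int} {acc : Option Int} (h0 : (0:Int) ∈ L)
    (hL : ∀ x ∈ L, 0 ≤ x) (hacc : NonnegO acc) : L.foldl omin acc = some 0 := by
  induction L generalizing acc with
  | nil => simp at h0
  | cons x L ih =>
      by_cases hx0 : (0:Int) ∈ L
      · refine ih hx0 (fun y hy => hL y (by simp [hy])) ?_
        intro a ha
        have hx : 0 ≤ x := hL x (by simp)
        cases acc with
        | none => simp [omin] at ha; omega
        | some b =>
            have hb := hacc b rfl
            simp [omin] at ha; subst ha; exact le_min hb hx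
      · have hx : x = 0 := by
          rcases List.mem_cons.mp h0 with h | h
          · omega
          · exact absurd h hx0
        subst hx
        have hstep : omin acc 0 = some 0 := by
          cases acc with
          | none => rfl
          | some b => simp [omin, min_eq_right (hacc b rfl)]
        rw [List.foldl_cons, hstep]
        exact foldl_omin_absorb (fun y hy => hL y (by simp [hy]))

theorem flatMap_singleton_map {α : Type} (L : List α) (h : α → Int) :
    L.flatMap (fun j => [h j]) = L.map h := by
  induction L with
  | nil => rfl
  | cons a L ih => simp [ih]

theorem flatMap_split {α : Type} (L : List α) (f g : α → List Int) :
    (L.flatMap (fun j => f j ++ g j)).Perm (L.flatMap f ++ L.flatMap g) := by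
  induction L with
  | nil => simp
  | cons a L ih =>
      simp only [List.flatMap_cons]
      refine ((ih.append_left (f a ++ g a)).trans ?_)
      rw [List.perm_iff_count]
      intro b
      simp [List.count_append]
      omega

theorem pairs_nonneg (xs : List Int) (tv : Int) (l r : Nat) :
    ∀ x ∈ pairs xs tv l r, 0 ≤ x := by
  intro x hx
  simp only [pairs, List.mem_flatMap, List.mem_map] at hx
  obtain ⟨j, _, k, _, rfl⟩ := hx
  exact abs_nonneg _

theorem cands_nonneg (xs : List Int) (t : Int) (i : Nat) :
    ∀ x ∈ cands xs t i, 0 ≤ x := by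
  intro x hx
  simp only [cands, List.mem_flatMap] at hx
  obtain ⟨ii, _, hm⟩ := hx
  exact pairs_nonneg _ _ _ _ x hm

/-- sorted access is monotone in the index. -/
theorem sorted_getD_mono {xs : List Int} (hs : xs.Pairwise (· ≤ ·)) {i j : Nat}
    (hij : i ≤ j) (hj : j < xs.length) : xs.getD i 0 ≤ xs.getD j 0 := by
  rcases Nat.lt_or_ge i j with h | h
  · have := (List.pairwise_iff_getElem.mp hs) i j (by omega) hj h
    rwa [List.getD_eq_getElem _ _ (by omega), List.getD_eq_getElem _ _ hj]
  · have : i = j := by omega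
    subst this; rfl

/-- decompose pairs by the first index. -/
theorem pairs_decomp_l (xs : List Int) (tv : Int) {l r : Nat} (h : l < r) :
    pairs xs tv l r = (List.range' (l + 1) (r - l)).map (colv xs tv l) ++ pairs xs tv (l + 1) r := by
  have h1 : r - l = (r - l - 1) + 1 := by omega
  have h2 : r - (l + 1) = r - l - 1 := by omega
  rw [pairs, h1, List.range'_succ, List.flatMap_cons]
  rw [pairs, h2]
  congr 1
  rw [← h1]

/-- decompose pairs by the last index (as a permutation). -/
theorem pairs_decomp_r (xs : List Int) (tv : Int) {l r : Nat} (h : l < r) :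
    (pairs xs tv l r).Perm
      ((List.range' l (r - l)).map (fun j => colv xs tv j r) ++ pairs xs tv l (r - 1)) := by
  have hsplit : pairs xs tv l r =
      (List.range' l (r - l)).flatMap
        (fun j => ((List.range' (j + 1) ((r - 1) - j)).map (colv xs tv j)) ++ [colv xs tv j r]) := by
    rw [pairs]
    refine List.flatMap_congr (fun j hj => ?_)
    have hjr : j < r := by
      have := List.mem_range'_1.mp hj; omega
    have h1 : r - j = ((r - 1) - j) + 1 := by omega
    have h2 : j + 1 + 1 * ((r - 1) - j) = r := by omega
    rw [h1, List.range'_concat, h2, List.map_append]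
    simp
  rw [hsplit]
  refine (flatMap_split _ _ _).trans (List.perm_append_comm.trans (List.Perm.append ?_ ?_))
  · rw [flatMap_singleton_map]
  · -- the j = r-1 block of the longer range is empty
    have h1 : r - l = (r - 1 - l) + 1 := by omega
    have h2 : l + 1 * (r - 1 - l) = r - 1 := by omega
    rw [h1, List.range'_concat, h2, List.flatMap_append]
    simp [pairs]

/-- the current pair's value is a member of pairs. -/
theorem colv_mem_pairs (xs : List Int) (tv : Int) {l r : Nat} (h : l < r) :
    colv xs tv l r ∈ pairs xs tv l r := by
  rw [pairs]
  refine List.mem_flatMap.mpr ⟨l, ?_, ?_⟩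
  · exact List.mem_range'_1.mpr ⟨le_refl l, by omega⟩
  · exact List.mem_map.mpr ⟨r, List.mem_range'_1.mpr ⟨by omega, by omega⟩, rfl⟩

/-- A's two-step diff update is the option-min. -/
theorem diff_update_eq (diff : Option Int) (sa : Int) :
    (match (if diff = none then some sa else diff) with
      | none => (if diff = none then some sa else diff)
      | some d => if sa < d then some sa else (if diff = none then some sa else diff)) =
      omin diff sa := by
  cases diff with
  | none => simp [omin]
  | some d =>
      by_cases h : sa < d <;> simp [omin, h, min_def]

theorem omin_nonneg {acc : Option Int} {a : Int} (hacc : NonnegO acc) (ha : 0 ≤ a) :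
    NonnegO (omin acc a) := by
  intro b hb
  cases acc with
  | none => simp [omin] at hb; omega
  | some c =>
      have := hacc c rfl
      simp [omin] at hb
      subst hb
      exact le_min this ha

theorem foldl_omin_cons_small {tail : List Int} (acc : Option Int) {sa : Int}
    (h : ∀ x ∈ tail, sa ≤ x) : tail.foldl omin (omin acc sa) = omin acc sa := by
  cases acc with
  | none => exact foldl_omin_absorb h
  | some b =>
      show tail.foldl omin (some (min b sa)) = some (min b sa)
      exact foldl_omin_absorb (fun x hx => le_trans (min_le_right b sa) (h x hx))

theorem foldl_omin_flat {α : Type} (L : List α) (g : α → List Int) (acc : Option Int) :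
    L.foldl (fun b x => (g x).foldl omin b) acc = (L.flatMap g).foldl omin acc := by
  induction L generalizing acc with
  | nil => rfl
  | cons a L ih => simp [List.flatMap_cons, List.foldl_append, ih]

/-- one unfolding of the two-pointer loop, with the diff update folded into omin. -/
theorem tpLoop_unfold (xs : List Int) (tv : Int) (l r : Nat) (acc : Option Int) (h : l < r) :
    tpLoop xs tv l r acc =
      (if xs.getD l 0 + xs.getD r 0 - tv = 0 then Sum.inl |xs.getD l 0 + xs.getD r 0 - tv|
       else tpLoop xs tv
         (if xs.getD l 0 + xs.getD r 0 - tv < 0 then l + 1 else l)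
         (if xs.getD l 0 + xs.getD r 0 - tv > 0 then r - 1 else r)
         (omin acc |xs.getD l 0 + xs.getD r 0 - tv|)) := by
  rw [tpLoop, dif_pos h]
  simp only [dite_eq_ite, diff_update_eq]

/-- the two-pointer loop computes the option-min over all remaining pairs
    (or returns early with 0, in which case that min is 0 too). -/
theorem tpLoop_spec (xs : List Int) (tv : Int) (hs : xs.Pairwise (· ≤ ·)) :
    ∀ (m l r : Nat) (acc : Option Int), r - l ≤ m → r < xs.length → NonnegO acc →
      (match tpLoop xs tv l r acc with
        | Sum.inl d => d = 0 ∧ (pairs xs tv l r).foldl omin acc = some 0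
        | Sum.inr d => d = (pairs xs tv l r).foldl omin acc) := by
  intro m
  induction m with
  | zero =>
      intro l r acc hm hr hacc
      have hlr : ¬ l < r := by omega
      rw [tpLoop, dif_neg hlr]
      simp [pairs, Nat.sub_eq_zero_of_le (by omega : r ≤ l)]
  | succ m ih =>
      intro l r acc hm hr hacc
      by_cases hlr : l < r
      · rw [tpLoop_unfold xs tv l r acc hlr]
        by_cases hs0 : xs.getD l 0 + xs.getD r 0 - tv = 0
        · rw [if_pos hs0]
          refine ⟨by rw [hs0]; simp, ?_⟩
          refine foldl_omin_zero ?_ (pairs_nonneg _ _ _ _) hacc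
          have hc : colv xs tv l r = 0 := by rw [colv, hs0]; simp
          exact hc ▸ colv_mem_pairs xs tv hlr
        · rw [if_neg hs0]
          rcases lt_trichotomy (xs.getD l 0 + xs.getD r 0 - tv) 0 with hneg | h0 | hpos
          · -- sub_value < 0 : advance left
            rw [if_pos hneg, if_neg (by omega : ¬ xs.getD l 0 + xs.getD r 0 - tv > 0)]
            have hfold : (pairs xs tv l r).foldl omin acc
                = (pairs xs tv (l + 1) r).foldl omin (omin acc |xs.getD l 0 + xs.getD r 0 - tv|) := by
              rw [pairs_decomp_l xs tv hlr, List.foldl_append]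
              congr 1
              have h1 : r - l = (r - l - 1) + 1 := by omega
              have h2 : l + 1 + 1 * (r - l - 1) = r := by omega
              have hperm : ((List.range' (l + 1) (r - l)).map (colv xs tv l)).Perm
                  (colv xs tv l r :: (List.range' (l + 1) (r - l - 1)).map (colv xs tv l)) := by
                rw [h1, List.range'_concat, h2, List.map_append]
                exact List.perm_append_comm
              rw [foldl_omin_perm hperm acc, List.foldl_cons]
              have hcl : omin acc (colv xs tv l r) = omin acc |xs.getD l 0 + xs.getD r 0 - tv| := rfl
              rw [hcl]
              refine foldl_omin_cons_small acc ?_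
              intro x hx
              obtain ⟨k, hk, rfl⟩ := List.mem_map.mp hx
              have hkb := List.mem_range'_1.mp hk
              have hmono : xs.getD k 0 ≤ xs.getD r 0 := sorted_getD_mono hs (by omega) hr
              have h3 : |xs.getD l 0 + xs.getD r 0 - tv| = -(xs.getD l 0 + xs.getD r 0 - tv) :=
                abs_of_neg hneg
              calc |xs.getD l 0 + xs.getD r 0 - tv|
                  ≤ -(xs.getD l 0 + xs.getD k 0 - tv) := by omega
                _ ≤ |xs.getD l 0 + xs.getD k 0 - tv| := neg_le_abs _
                _ = colv xs tv l k := rfl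
            rw [hfold]
            exact ih (l + 1) r (omin acc _) (by omega) hr (omin_nonneg hacc (abs_nonneg _))
          · exact absurd h0 hs0
          · -- sub_value > 0 : retreat right
            rw [if_neg (by omega : ¬ xs.getD l 0 + xs.getD r 0 - tv < 0), if_pos hpos]
            have hfold : (pairs xs tv l r).foldl omin acc
                = (pairs xs tv l (r - 1)).foldl omin (omin acc |xs.getD l 0 + xs.getD r 0 - tv|) := by
              rw [foldl_omin_perm (pairs_decomp_r xs tv hlr) acc, List.foldl_append]
              congr 1
              have h1 : r - l = (r - l - 1) + 1 := by omega
              rw [h1, List.range'_succ, List.map_cons, List.foldl_cons]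
              have hcl : omin acc (colv xs tv l r) = omin acc |xs.getD l 0 + xs.getD r 0 - tv| := rfl
              rw [hcl]
              refine foldl_omin_cons_small acc ?_
              intro x hx
              obtain ⟨j, hj, rfl⟩ := List.mem_map.mp hx
              have hjb := List.mem_range'_1.mp hj
              have hmono : xs.getD l 0 ≤ xs.getD j 0 := sorted_getD_mono hs (by omega) (by omega)
              have h3 : |xs.getD l 0 + xs.getD r 0 - tv| = xs.getD l 0 + xs.getD r 0 - tv :=
                abs_of_pos hpos
              calc |xs.getD l 0 + xs.getD r 0 - tv|
                  ≤ xs.getD j 0 + xs.getD r 0 - tv := by omega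
                _ ≤ |xs.getD j 0 + xs.getD r 0 - tv| := le_abs_self _
                _ = colv xs tv j r := rfl
            rw [hfold]
            exact ih l (r - 1) (omin acc _) (by omega) (by omega) (omin_nonneg hacc (abs_nonneg _))
      · rw [tpLoop, dif_neg hlr]
        simp [pairs, Nat.sub_eq_zero_of_le (by omega : r ≤ l)]

/-- the outer loop folds in every remaining first index. -/
theorem outerLoop_spec (xs : List Int) (t : Int) (hs : xs.Pairwise (· ≤ ·)) :
    ∀ (m i : Nat) (acc : Option Int), xs.length - i ≤ m → NonnegO acc →
      outerLoop xs t i acc = (cands xs t i).foldl omin acc := by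
  intro m
  induction m with
  | zero =>
      intro i acc hm hacc
      have hi : ¬ (i + 3 ≤ xs.length) := by omega
      rw [outerLoop, dif_neg hi]
      have hc : cands xs t i = [] := by
        simp [cands, Nat.sub_eq_zero_of_le (by omega : xs.length ≤ i)]
      rw [hc]
      rfl
  | succ m ih =>
      intro i acc hm hacc
      rw [outerLoop]
      by_cases hi : i + 3 ≤ xs.length
      · rw [dif_pos hi]
        have hc : cands xs t i =
            pairs xs (t - xs.getD i 0) (i + 1) (xs.length - 1) ++ cands xs t (i + 1) := by
          rw [cands, cands]
          have h1 : xs.length - i = (xs.length - (i + 1)) + 1 := by omega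
          rw [h1, List.range'_succ, List.flatMap_cons]
        have hspec := tpLoop_spec xs (t - xs.getD i 0) hs xs.length (i + 1) (xs.length - 1) acc
          (by omega) (by omega) hacc
        cases htp : tpLoop xs (t - xs.getD i 0) (i + 1) (xs.length - 1) acc with
        | inl d =>
            simp only [htp] at hspec
            obtain ⟨hd0, hf⟩ := hspec
            subst hd0
            rw [hc, List.foldl_append, hf]
            exact (foldl_omin_absorb (fun x hx => cands_nonneg xs t (i + 1) x hx)).symm
        | inr d =>
            simp only [htp] at hspec
            rw [hc, List.foldl_append, ← hspec]
            exact ih (i + 1) d (by omega)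
              (by rw [hspec]; exact foldl_omin_nonneg hacc (pairs_nonneg _ _ _ _))
      · rw [dif_neg hi]
        have hc : cands xs t i = [] := by
          rw [cands]
          refine List.flatMap_eq_nil_iff.mpr (fun ii hii => ?_)
          have := List.mem_range'_1.mp hii
          simp [pairs, Nat.sub_eq_zero_of_le (by omega : xs.length - 1 ≤ ii + 1)]
        rw [hc]
        rfl

/-- B's running-minimum update is the option-min. -/
theorem bstep_eq_omin (b : Option Int) (d : Int) :
    (match b with
      | none => some d
      | some bb => if d < bb then some d else b) = omin b d := by
  cases b with
  | none => rfl
  | some bb => by_cases h : d < bb <;> simp [omin, h, min_def]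

theorem solve_alt_fold (xs : List Int) (t : Int) (n : Nat) :
    ((List.range n).foldl (fun best i =>
      (List.range' (i + 1) (n - (i + 1))).foldl (fun best j =>
        (List.range' (j + 1) (n - (j + 1))).foldl (fun best k =>
          let d := |xs.getD i 0 + xs.getD j 0 + xs.getD k 0 - t|
          match best with
          | none => some d
          | some b => if d < b then some d else best) best) best) none)
    = ((List.range n).flatMap (fun i => (List.range' (i + 1) (n - (i + 1))).flatMap
        (fun j => (List.range' (j + 1) (n - (j + 1))).map
          (fun k => |xs.getD i 0 + xs.getD j 0 + xs.getD k 0 - t|)))).foldl omin none := by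
  rw [← foldl_omin_flat]
  refine PySem.List.foldl_congr_mem _ _ _ _ (fun acc i _ => ?_)
  rw [← foldl_omin_flat]
  refine PySem.List.foldl_congr_mem _ _ _ _ (fun acc2 j _ => ?_)
  rw [List.foldl_map]
  exact PySem.List.foldl_congr_mem _ _ _ _ (fun acc3 k _ => bstep_eq_omin acc3 _)

theorem pairsAt_eq (xs : List Int) (t : Int) (i : Nat) :
    pairs xs (t - xs.getD i 0) (i + 1) (xs.length - 1)
    = (List.range' (i + 1) (xs.length - (i + 1))).flatMap
        (fun j => (List.range' (j + 1) (xs.length - (j + 1))).map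
          (fun k => |xs.getD i 0 + xs.getD j 0 + xs.getD k 0 - t|)) := by
  have hval : ∀ j : Nat, (List.range' (j + 1) ((xs.length - 1) - j)).map (colv xs (t - xs.getD i 0) j)
      = (List.range' (j + 1) (xs.length - (j + 1))).map
          (fun k => |xs.getD i 0 + xs.getD j 0 + xs.getD k 0 - t|) := by
    intro j
    have h2 : xs.length - 1 - j = xs.length - (j + 1) := by omega
    rw [h2]
    refine List.map_congr_left (fun k _ => ?_)
    rw [colv]
    congr 1
    ring
  rw [pairs]
  by_cases hn : i + 2 ≤ xs.length
  · have h1 : xs.length - (i + 1) = ((xs.length - 1) - (i + 1)) + 1 := by omega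
    have h2 : i + 1 + 1 * (xs.length - 1 - (i + 1)) = xs.length - 1 := by omega
    rw [h1, List.range'_concat, h2, List.flatMap_append]
    have hlast : (List.range' ((xs.length - 1) + 1) (xs.length - ((xs.length - 1) + 1))).map
        (fun k => |xs.getD i 0 + xs.getD (xs.length - 1) 0 + xs.getD k 0 - t|) = [] := by
      simp [Nat.sub_eq_zero_of_le (by omega : xs.length ≤ xs.length - 1 + 1)]
    simp only [List.flatMap_cons, List.flatMap_nil, hlast, List.append_nil]
    exact List.flatMap_congr (fun j _ => hval j)
  · have ha : xs.length - 1 - (i + 1) = 0 := by omega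
    have hb : xs.length - (i + 1) = 0 := by omega
    rw [ha, hb]
    rfl

theorem cands_zero_eq (xs : List Int) (t : Int) :
    cands xs t 0 = (List.range xs.length).flatMap
      (fun i => (List.range' (i + 1) (xs.length - (i + 1))).flatMap
        (fun j => (List.range' (j + 1) (xs.length - (j + 1))).map
          (fun k => |xs.getD i 0 + xs.getD j 0 + xs.getD k 0 - t|))) := by
  rw [cands, List.range_eq_range', Nat.sub_zero]
  exact List.flatMap_congr (fun i _ => pairsAt_eq xs t i)

/-- B's nested folds are the option-min over the same candidate list. -/
theorem solve_alt_eq (int_list : List Int) (target : Int) :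
    solve_alt int_list target =
      (cands (PySem.List.sorted int_list (fun x => x) false) target 0).foldl omin none := by
  rw [cands_zero_eq]
  exact solve_alt_fold (PySem.List.sorted int_list (fun x => x) false) target
    (PySem.List.sorted int_list (fun x => x) false).length

-- ===== VERDICT (by name: the statement is the Claim_ definition above) =====
theorem solve_spec : Claim_equal_solve := by
  intro int_list target _
  unfold Spec_solve
  rw [solve_alt_eq]
  unfold solve
  rw [outerLoop_spec _ _ (PySem.List.sorted_pairwise int_list (fun x => x)) (PySem.List.sorted int_list (fun x => x) false).length 0 none (by omega) (by intro a h; cases h)]
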